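-- pv_equiv track=rewrite | github.com/Stefan9283/Recreational-Coding | AdventOfCode/2021/day6/p1.py | doIteration
-- ===== SOURCE A (Python) =====
-- from typing import List, overload
--
-- def doIteration(L: List) -> List:
--     n = len(L)
--     for i in range(n):
--         if L[i] != 0:
--             L[i] -= 1
--         else:
--             L[i] = 6
--             L.append(8)
--     return L
-- ===== SOURCE B (Python) =====
-- def doIteration(L):
--     zeros = L.count(0)
--     L[:] = [6 if x == 0 else x - 1 for x in L]
--     L.extend([8] * zeros)
--     return L
-- ===== Notes on version B (the rewrite author's own statement) =====
-- stated objective: alternative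
-- what changed: Replaces A's single index loop that conditionally appends a newborn per zero with a three-phase decomposition: count the zeros first, age all fish in one bulk slice-assignment mapping, then append all newborns at once with a single extend.
import Mathlib
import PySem

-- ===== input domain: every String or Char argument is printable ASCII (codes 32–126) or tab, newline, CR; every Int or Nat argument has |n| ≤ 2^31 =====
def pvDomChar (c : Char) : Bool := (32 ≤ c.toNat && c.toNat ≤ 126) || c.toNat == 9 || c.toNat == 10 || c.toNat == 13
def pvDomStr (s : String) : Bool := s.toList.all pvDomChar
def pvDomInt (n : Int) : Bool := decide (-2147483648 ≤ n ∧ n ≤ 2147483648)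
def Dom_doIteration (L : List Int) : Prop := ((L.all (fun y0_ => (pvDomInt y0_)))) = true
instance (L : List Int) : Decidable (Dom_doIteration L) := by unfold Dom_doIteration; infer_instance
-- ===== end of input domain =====

-- B replaces A's inline-appending index loop by count zeros / bulk map / bulk extend (same cost, different decomposition); both mutate L in Python, equivalence is about the return value.


-- ===== PORT A =====
-- loop body of A: read L[i], age or reset-and-append
def doIterationStep (acc : List Int) (i : Int) : List Int :=
  if PySem.List.pyGetD acc i 0 ≠ 0 then
    PySem.List.pySetD acc i (PySem.List.pyGetD acc i 0 - 1)
  else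
    (PySem.List.pySetD acc i 6) ++ [8]

def doIteration (L : List Int) : List Int :=
  let n : Int := L.length
  (PySem.List.pyRange 0 n 1).foldl doIterationStep L

-- ===== PORT B =====
def doIteration_alt (L : List Int) : List Int :=
  let zeros := L.count 0
  L.map (fun x => if x = 0 then 6 else x - 1) ++ List.replicate zeros 8

-- ===== PRECONDITION & SPEC =====
def Spec_doIteration (L : List Int) (out : List Int) : Prop := out = doIteration_alt L
instance (L : List Int) (out : List Int) : Decidable (Spec_doIteration L out) := by unfold Spec_doIteration; infer_instance

-- ===== CLAIM (what is proved, stated in full; the proofs are below) =====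
def Claim_equal_doIteration : Prop := ∀ (L : List Int), Dom_doIteration L → Spec_doIteration L (doIteration L)

-- ===== LEMMAS AND PROOFS =====

lemma doIteration_key (S P T : List Int) :
    (PySem.List.pyRange (P.length : Int) ((P.length : Int) + S.length) 1).foldl doIterationStep (P ++ S ++ T)
      = P ++ S.map (fun x => if x = 0 then 6 else x - 1) ++ T ++ List.replicate (S.count 0) 8 := by
  induction S generalizing P T with
  | nil =>
    simp [PySem.List.pyRange_one_eq_nil]
  | cons x S' ih =>
    have hlt : (P.length : Int) < (P.length : Int) + ((x :: S').length : Int) := by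
      simp
    rw [PySem.List.pyRange_one_cons hlt]
    simp only [List.foldl_cons]
    by_cases hx : x = 0
    · subst hx
      have hstep : doIterationStep (P ++ 0 :: S' ++ T) (P.length : Int)
          = (P ++ [6]) ++ S' ++ (T ++ [8]) := by
        simp [doIterationStep]
      rw [show P ++ (0 :: S') ++ T = P ++ 0 :: S' ++ T by simp, hstep]
      have hlen : ((P ++ [6]).length : Int) = (P.length : Int) + 1 := by simp
      have := ih (P ++ [6]) (T ++ [8])
      rw [hlen] at this
      rw [show (P.length : Int) + (((0 : Int) :: S').length : Int) = (P.length : Int) + 1 + (S'.length : Int) by simp; omega]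
      rw [this]
      simp
      rw [← List.replicate_succ, List.replicate_succ']
    · have hstep : doIterationStep (P ++ x :: S' ++ T) (P.length : Int)
          = (P ++ [x - 1]) ++ S' ++ T := by
        simp [doIterationStep, hx]
      rw [show P ++ (x :: S') ++ T = P ++ x :: S' ++ T by simp, hstep]
      have := ih (P ++ [x - 1]) T
      have hlen : (((P ++ [x - 1]).length : Int)) = (P.length : Int) + 1 := by simp
      rw [hlen] at this
      rw [show (P.length : Int) + ((x :: S').length : Int) = (P.length : Int) + 1 + (S'.length : Int) by simp; omega]
      rw [this]
      simp [hx]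

-- ===== VERDICT (by name: the statement is the Claim_ definition above) =====
theorem doIteration_spec : Claim_equal_doIteration := by
  intro L _
  unfold Spec_doIteration doIteration doIteration_alt
  have := doIteration_key L [] []
  simpa using this
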